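-- pv_equiv track=rewrite | github.com/Steflavoie65/Lychrel_196_Formula | scripts/check_orbit_moduli.py | apply_T_simple
-- ===== SOURCE A (Python) =====
-- def number_to_digits_int(n: int):
--     if n == 0:
--         return [0]
--     digits = []
--     while n > 0:
--         n, r = divmod(n, 10)
--         digits.append(r)
--     return digits  # LSB-first
--
-- def digits_to_number_int(digits):
--     val = 0
--     for d in reversed(digits):
--         val = val * 10 + d
--     return val
--
-- def apply_T_simple(n: int):
--     digits = number_to_digits_int(n)
--     d = len(digits)
--     res_digits = [0] * (d + 1)
--     carries = [0] * (d + 1)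
--     for i in range(d):
--         j = d - 1 - i
--         s = digits[i] + digits[j] + carries[i]
--         res_digits[i] = s % 10
--         carries[i + 1] = s // 10
--     L = d
--     if carries[d] > 0:
--         res_digits[d] = carries[d]
--         L = d + 1
--     else:
--         res_digits = res_digits[:d]
--     Tn = digits_to_number_int(res_digits[:L])
--     return Tn, res_digits[:L], carries
-- ===== SOURCE B (Python) =====
-- def number_to_digits_int(n: int):
--     if n == 0:
--         return [0]
--     digits = []
--     while n > 0:
--         n, r = divmod(n, 10)
--         digits.append(r)
--     return digits  # LSB-first
--
-- def apply_T_simple(n: int):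
--     # reverse n arithmetically
--     R, m = 0, n
--     while m > 0:
--         R, m = R * 10 + m % 10, m // 10
--     Tn = n + R
--     res = number_to_digits_int(Tn)
--     d = len(number_to_digits_int(n))
--     # carries via prefix-modulus formula instead of sequential propagation
--     carries, p = [], 1
--     for _ in range(d + 1):
--         carries.append((n % p + R % p) // p)
--         p *= 10
--     return Tn, res, carries
-- ===== Notes on version B (the rewrite author's own statement) =====
-- stated objective: alternative
-- what changed: B replaces A's digit-array schoolbook addition loop (paired digits with sequentially propagated carries written into preallocated arrays) by direct arithmetic: it reverses n with an arithmetic fold, computes Tn = n + R in one addition, reads the result digits off Tn itself, and computes each carry independently by a closed prefix-modulus formula; Pre_ excludes negative n, where reverse-and-add is not defined and the two degenerate outputs are equally arbitrary.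
-- outside the precondition, e.g. on apply_T_simple(-1): A returns (0, [], [0]), B returns (-1, [], [0]); on apply_T_simple(-7): A returns (0, [], [0]), B returns (-7, [], [0])
import Mathlib
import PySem

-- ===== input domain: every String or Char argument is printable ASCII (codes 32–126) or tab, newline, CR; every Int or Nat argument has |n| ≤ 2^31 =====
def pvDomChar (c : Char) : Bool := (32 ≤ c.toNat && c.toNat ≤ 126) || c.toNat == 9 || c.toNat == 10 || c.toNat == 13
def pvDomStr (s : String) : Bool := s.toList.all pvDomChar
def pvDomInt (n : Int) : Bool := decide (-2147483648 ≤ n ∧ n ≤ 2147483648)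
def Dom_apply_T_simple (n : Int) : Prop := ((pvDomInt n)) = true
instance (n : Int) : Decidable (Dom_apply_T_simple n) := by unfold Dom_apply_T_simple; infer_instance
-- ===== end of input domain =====

-- B replaces A's digit-array schoolbook addition (sequential carries) by direct arithmetic:
-- arithmetic reversal, one big addition Tn = n + R, digits read off Tn, and carries by the
-- closed prefix-modulus formula; objective: alternative (same asymptotic cost).

-- ===== PORT A =====
-- while n > 0: n, r = divmod(n, 10); digits.append(r)
def pvNdiLoop (n : Int) : List Int :=
  if h : 0 < n then PySem.Int.mod n 10 :: pvNdiLoop (PySem.Int.floordiv n 10) else []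
termination_by n.toNat
decreasing_by
  rw [PySem.Int.floordiv_eq_ediv_of_pos (by omega : (0:Int) < 10)]
  omega

def number_to_digits_int (n : Int) : List Int :=
  if n = 0 then [0] else pvNdiLoop n

def digits_to_number_int (digits : List Int) : Int :=
  digits.reverse.foldl (fun val dg => val * 10 + dg) 0

def apply_T_simple (n : Int) : Int × List Int × List Int :=
  let digits := number_to_digits_int n
  let d := digits.length
  -- res_digits = [0]*(d+1); carries = [0]*(d+1); for i in range(d): …   (indices are in range)
  let rc := (List.range d).foldl (fun (st : List Int × List Int) i =>
      let j := d - 1 - i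
      let s := digits.getD i 0 + digits.getD j 0 + st.2.getD i 0
      (st.1.set i (PySem.Int.mod s 10), st.2.set (i + 1) (PySem.Int.floordiv s 10)))
    (List.replicate (d + 1) 0, List.replicate (d + 1) 0)
  let res := rc.1
  let carries := rc.2
  if carries.getD d 0 > 0 then
    let res2 := res.set d (carries.getD d 0)
    (digits_to_number_int (res2.take (d + 1)), res2.take (d + 1), carries)
  else
    (digits_to_number_int (res.take d), res.take d, carries)

-- ===== PORT B =====
-- while m > 0: R, m = R * 10 + m % 10, m // 10
def pvRevLoop (R m : Int) : Int :=
  if h : 0 < m then pvRevLoop (R * 10 + PySem.Int.mod m 10) (PySem.Int.floordiv m 10) else R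
termination_by m.toNat
decreasing_by
  rw [PySem.Int.floordiv_eq_ediv_of_pos (by omega : (0:Int) < 10)]
  omega

def apply_T_simple_alt (n : Int) : Int × List Int × List Int :=
  let R := pvRevLoop 0 n
  let Tn := n + R
  let res := number_to_digits_int Tn
  let d := (number_to_digits_int n).length
  -- for _ in range(d + 1): carries.append((n % p + R % p) // p); p *= 10
  let pc := (List.range (d + 1)).foldl (fun (st : Int × List Int) _ =>
      (st.1 * 10, st.2 ++ [PySem.Int.floordiv (PySem.Int.mod n st.1 + PySem.Int.mod R st.1) st.1]))
    (1, [])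
  (Tn, res, pc.2)

-- ===== PRECONDITION & SPEC =====
-- Pre_ excludes negative n, on which reverse-and-add is not defined and neither output is
-- specified: A's digit loop falls through to the degenerate (0, [], [0]) while B's arithmetic
-- yields (n, [], [0]) — both are equally arbitrary values for an out-of-domain input.
def Pre_apply_T_simple (n : Int) : Prop := 0 ≤ n
instance (n : Int) : Decidable (Pre_apply_T_simple n) := by unfold Pre_apply_T_simple; infer_instance

def pvWitness_apply_T_simple : Int := 196

def Spec_apply_T_simple (n : Int) (out : Int × List Int × List Int) : Prop := out = apply_T_simple_alt n
instance (n : Int) (out : Int × List Int × List Int) : Decidable (Spec_apply_T_simple n out) := by unfold Spec_apply_T_simple; infer_instance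

-- ===== CLAIM (what is proved, stated in full; the proofs are below) =====
def Claim_equal_apply_T_simple : Prop := ∀ (n : Int), Dom_apply_T_simple n → Pre_apply_T_simple n → Spec_apply_T_simple n (apply_T_simple n)


-- ===== LEMMAS AND PROOFS =====

-- digit/carry closed forms used by the equivalence argument
def pvDig (n : Int) (i : Nat) : Int := n / 10 ^ i % 10
def pvCar (n R : Int) (i : Nat) : Int := (n % 10 ^ i + R % 10 ^ i) / 10 ^ i

theorem pvNdiLoop_pos {n : Int} (hn : 0 < n) :
    pvNdiLoop n = n % 10 :: pvNdiLoop (n / 10) := by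
  rw [pvNdiLoop]
  simp [hn, PySem.Int.mod_eq_emod_of_pos (by omega : (0:Int) < 10),
    PySem.Int.floordiv_eq_ediv_of_pos (by omega : (0:Int) < 10)]

theorem pvNdiLoop_nonpos {n : Int} (hn : ¬ 0 < n) : pvNdiLoop n = [] := by
  rw [pvNdiLoop]; simp [hn]

theorem digits_spec : ∀ (k : Nat) (n : Int), n.toNat ≤ k → 0 < n →
    pvNdiLoop n = (List.range (pvNdiLoop n).length).map (pvDig n)
    ∧ 10 ^ ((pvNdiLoop n).length - 1) ≤ n ∧ n < 10 ^ (pvNdiLoop n).length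
    ∧ 1 ≤ (pvNdiLoop n).length := by
  intro k
  induction k with
  | zero => intro n hk hn; omega
  | succ k ih =>
    intro n hk hn
    rw [pvNdiLoop_pos hn]
    by_cases h10 : n < 10
    · have hq : n / 10 = 0 := by omega
      rw [hq, pvNdiLoop_nonpos (by omega)]
      refine ⟨?_, by simpa using hn, by simpa using h10, by simp⟩
      simp [pvDig]
    · have hqpos : 0 < n / 10 := by omega
      have hqk : (n / 10).toNat ≤ k := by omega
      obtain ⟨hrep, hlo, hhi, hlen⟩ := ih (n / 10) hqk hqpos
      set q := n / 10 with hqdef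
      set L := (pvNdiLoop q).length with hL
      have hdig0 : pvDig n 0 = n % 10 := by simp [pvDig]
      have hdigS : ∀ i : Nat, pvDig n (i + 1) = pvDig q i := by
        intro i
        simp only [pvDig, pow_succ, hqdef]
        rw [mul_comm ((10:Int) ^ i) 10, ← Int.ediv_ediv_of_nonneg (by omega)]
      constructor
      · show n % 10 :: pvNdiLoop q
            = (List.range (n % 10 :: pvNdiLoop q).length).map (pvDig n)
        simp only [List.length_cons, ← hL, List.range_succ_eq_map, List.map_cons, List.map_map,
          hdig0]
        congr 1
        rw [hrep]
        apply List.map_congr_left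
        intro a _
        simp only [Function.comp_apply, Nat.succ_eq_add_one]
        exact (hdigS a).symm
      · have hql : 10 * q ≤ n := by omega
        have hqh : n ≤ 10 * q + 9 := by omega
        have h1 : (10:Int) ^ L = 10 ^ (L - 1) * 10 := by
          have hL1 : L - 1 + 1 = L := by omega
          rw [← pow_succ, hL1]
        refine ⟨?_, ?_, by simp⟩
        · have h2 : (10:Int) ^ ((L + 1) - 1) = 10 ^ L := by norm_num
          rw [List.length_cons, ← hL, h2, h1]
          calc (10:Int) ^ (L - 1) * 10 ≤ q * 10 := by linarith
            _ ≤ n := by omega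
        · rw [List.length_cons, ← hL, pow_succ]
          calc n ≤ 10 * q + 9 := hqh
            _ < 10 ^ L * 10 := by linarith

theorem pvRevLoop_pos {m : Int} (acc : Int) (hm : 0 < m) :
    pvRevLoop acc m = pvRevLoop (acc * 10 + m % 10) (m / 10) := by
  rw [pvRevLoop]
  simp [hm, PySem.Int.mod_eq_emod_of_pos (by omega : (0:Int) < 10),
    PySem.Int.floordiv_eq_ediv_of_pos (by omega : (0:Int) < 10)]

theorem pvRevLoop_nonpos {m : Int} (acc : Int) (hm : ¬ 0 < m) : pvRevLoop acc m = acc := by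
  rw [pvRevLoop]; simp [hm]

theorem rev_eq : ∀ (k : Nat) (m acc : Int), m.toNat ≤ k →
    pvRevLoop acc m = (pvNdiLoop m).foldl (fun a dg => a * 10 + dg) acc := by
  intro k
  induction k with
  | zero =>
    intro m acc hk
    have hm : ¬ 0 < m := by omega
    rw [pvRevLoop_nonpos acc hm, pvNdiLoop_nonpos hm]
    rfl
  | succ k ih =>
    intro m acc hk
    by_cases hm : 0 < m
    · rw [pvRevLoop_pos acc hm, pvNdiLoop_pos hm, List.foldl_cons]
      exact ih (m / 10) (acc * 10 + m % 10) (by omega)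
    · rw [pvRevLoop_nonpos acc hm, pvNdiLoop_nonpos hm]
      rfl

theorem foldl_shift (ds : List Int) : ∀ acc : Int,
    ds.foldl (fun a dg => a * 10 + dg) acc
      = acc * 10 ^ ds.length + ds.foldl (fun a dg => a * 10 + dg) 0 := by
  induction ds with
  | nil => intro acc; simp
  | cons a t iht =>
    intro acc
    simp only [List.foldl_cons, List.length_cons]
    rw [iht (acc * 10 + a), iht (0 * 10 + a), pow_succ]
    ring

theorem revVal_digit (ds : List Int) (h : ∀ x ∈ ds, 0 ≤ x ∧ x < 10) :
    0 ≤ ds.foldl (fun a dg => a * 10 + dg) 0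
    ∧ ds.foldl (fun a dg => a * 10 + dg) 0 < 10 ^ ds.length
    ∧ ∀ i < ds.length,
        (ds.foldl (fun a dg => a * 10 + dg) 0) / 10 ^ i % 10 = ds.getD (ds.length - 1 - i) 0 := by
  induction ds with
  | nil => refine ⟨le_refl 0, by norm_num, ?_⟩; intro i hi; simp at hi
  | cons a t iht =>
    obtain ⟨ha0, ha10⟩ := h a (List.mem_cons_self ..)
    obtain ⟨hW0, hWlt, hWdig⟩ := iht (fun x hx => h x (List.mem_cons_of_mem a hx))
    have hp : (0:Int) < 10 ^ t.length := by positivity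
    have hV : (a :: t).foldl (fun a dg => a * 10 + dg) 0
        = t.foldl (fun a dg => a * 10 + dg) 0 + a * 10 ^ t.length := by
      simp only [List.foldl_cons]
      rw [foldl_shift t (0 * 10 + a)]
      ring
    rw [hV]
    set W := t.foldl (fun a dg => a * 10 + dg) 0 with hWdef
    refine ⟨by nlinarith, ?_, ?_⟩
    · simp only [List.length_cons, pow_succ]
      nlinarith
    · intro i hi
      simp only [List.length_cons] at hi
      by_cases hit : i = t.length
      · subst hit
        rw [Int.add_mul_ediv_right _ _ (ne_of_gt hp),
          Int.ediv_eq_zero_of_lt hW0 hWlt]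
        simp only [List.length_cons, Nat.add_sub_cancel, Nat.sub_self, List.getD_cons_zero]
        simp [Int.emod_eq_of_lt ha0 ha10]
      · have hi' : i < t.length := by omega
        have hsplit : a * 10 ^ t.length = a * 10 ^ (t.length - 1 - i) * 10 * 10 ^ i := by
          have : (t.length - 1 - i) + 1 + i = t.length := by omega
          rw [mul_assoc, mul_assoc, ← pow_succ', ← pow_add]
          congr 2
          omega
        rw [hsplit]
        rw [Int.add_mul_ediv_right _ _ (ne_of_gt (by positivity : (0:Int) < 10 ^ i))]
        rw [Int.add_mul_emod_self_right]
        rw [hWdig i hi']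
        have h2 : (a :: t).length - 1 - i = (t.length - 1 - i) + 1 := by
          simp only [List.length_cons]; omega
        rw [h2, List.getD_cons_succ]

theorem digits_mem : ∀ (k : Nat) (n : Int), n.toNat ≤ k → ∀ x ∈ pvNdiLoop n, 0 ≤ x ∧ x < 10 := by
  intro k
  induction k with
  | zero =>
    intro n hk x hx
    rw [pvNdiLoop_nonpos (by omega)] at hx
    simp at hx
  | succ k ih =>
    intro n hk x hx
    by_cases hn : 0 < n
    · rw [pvNdiLoop_pos hn] at hx
      rcases List.mem_cons.mp hx with h | h
      · subst h; omega
      · exact ih (n / 10) (by omega) x h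
    · rw [pvNdiLoop_nonpos hn] at hx
      simp at hx

theorem dtn_cons (x : Int) (t : List Int) :
    digits_to_number_int (x :: t) = digits_to_number_int t * 10 + x := by
  simp [digits_to_number_int, List.reverse_cons, List.foldl_append]

theorem roundtrip_loop : ∀ (k : Nat) (n : Int), n.toNat ≤ k → 0 ≤ n →
    digits_to_number_int (pvNdiLoop n) = n := by
  intro k
  induction k with
  | zero =>
    intro n hk hn
    rw [pvNdiLoop_nonpos (by omega)]
    have : n = 0 := by omega
    simp [this, digits_to_number_int]
  | succ k ih =>
    intro n hk hn
    by_cases hpos : 0 < n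
    · rw [pvNdiLoop_pos hpos, dtn_cons, ih (n / 10) (by omega) (by omega)]
      omega
    · rw [pvNdiLoop_nonpos hpos]
      have : n = 0 := by omega
      simp [this, digits_to_number_int]

theorem emod_mul_dec (x p : Int) (hp : 0 < p) : x % (p * 10) = p * (x / p % 10) + x % p := by
  have h := Int.ediv_ediv_of_nonneg (x := x) (z := (10:Int)) (le_of_lt hp)
  rw [Int.emod_def x (p * 10), Int.emod_def (x / p) 10, Int.emod_def x p, ← h]
  ring

theorem pvCar_zero (x y : Int) : pvCar x y 0 = 0 := by
  simp [pvCar]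

theorem pv_s_eq (x y : Int) (i : Nat) :
    pvDig x i + pvDig y i + pvCar x y i = (x % (10 ^ i * 10) + y % (10 ^ i * 10)) / 10 ^ i := by
  have hppos : (0:Int) < 10 ^ i := by positivity
  rw [emod_mul_dec x _ hppos, emod_mul_dec y _ hppos]
  have h1 : 10 ^ i * (x / 10 ^ i % 10) + x % 10 ^ i + (10 ^ i * (y / 10 ^ i % 10) + y % 10 ^ i)
      = (x % 10 ^ i + y % 10 ^ i) + (x / 10 ^ i % 10 + y / 10 ^ i % 10) * 10 ^ i := by ring
  rw [h1, Int.add_mul_ediv_right _ _ (ne_of_gt hppos)]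
  simp only [pvDig, pvCar]
  ring

theorem carry_next (x y : Int) (hx : 0 ≤ x) (hy : 0 ≤ y) (i : Nat) :
    pvCar x y (i + 1) = (pvDig x i + pvDig y i + pvCar x y i) / 10 := by
  have hppos : (0:Int) < 10 ^ i := by positivity
  rw [pv_s_eq x y i, Int.ediv_ediv_of_nonneg (le_of_lt hppos)]
  simp only [pvCar, pow_succ]

theorem digit_eq (x y : Int) (hx : 0 ≤ x) (hy : 0 ≤ y) (i : Nat) :
    (pvDig x i + pvDig y i + pvCar x y i) % 10 = pvDig (x + y) i := by
  have hppos : (0:Int) < 10 ^ i := by positivity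
  have hm10 : (0:Int) < 10 ^ i * 10 := by linarith
  rw [pv_s_eq x y i]
  obtain ⟨e, he01, hXeq⟩ : ∃ e : Int, (e = 0 ∨ e = 1) ∧
      x % (10 ^ i * 10) + y % (10 ^ i * 10)
        = (x + y) % (10 ^ i * 10) + (10 ^ i * 10) * e := by
    refine ⟨(x % (10 ^ i * 10) + y % (10 ^ i * 10)) / (10 ^ i * 10), ?_, ?_⟩
    · have hx0 := Int.emod_nonneg x (ne_of_gt hm10)
      have hy0 := Int.emod_nonneg y (ne_of_gt hm10)
      have hxl := Int.emod_lt_of_pos x hm10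
      have hyl := Int.emod_lt_of_pos y hm10
      have h0 : 0 ≤ (x % (10 ^ i * 10) + y % (10 ^ i * 10)) / (10 ^ i * 10) :=
        Int.ediv_nonneg (by omega) (le_of_lt hm10)
      have h2 : (x % (10 ^ i * 10) + y % (10 ^ i * 10)) / (10 ^ i * 10) < 2 := by
        rw [Int.ediv_lt_iff_lt_mul hm10]; omega
      omega
    · rw [Int.add_emod x y]
      rw [Int.emod_def (x % (10 ^ i * 10) + y % (10 ^ i * 10)) (10 ^ i * 10)]
      ring
  rw [hXeq]
  have h3 : (x + y) % (10 ^ i * 10) + (10 ^ i * 10) * e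
      = (x + y) % (10 ^ i * 10) + (e * 10) * 10 ^ i := by ring
  rw [h3, Int.add_mul_ediv_right _ _ (ne_of_gt hppos)]
  rw [Int.add_mul_emod_self_right]
  -- ((x+y) % (10^i*10)) / 10^i = pvDig (x+y) i
  rw [emod_mul_dec (x + y) _ hppos]
  have h4 : 10 ^ i * ((x + y) / 10 ^ i % 10) + (x + y) % 10 ^ i
      = (x + y) % 10 ^ i + ((x + y) / 10 ^ i % 10) * 10 ^ i := by ring
  rw [h4, Int.add_mul_ediv_right _ _ (ne_of_gt hppos),
    Int.ediv_eq_zero_of_lt (Int.emod_nonneg _ (ne_of_gt hppos)) (Int.emod_lt_of_pos _ hppos)]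
  have h5 : 0 ≤ (x + y) / 10 ^ i % 10 := Int.emod_nonneg _ (by omega)
  have h6 : (x + y) / 10 ^ i % 10 < 10 := Int.emod_lt_of_pos _ (by omega)
  simp only [pvDig, zero_add]
  rw [Int.emod_eq_of_lt h5 h6]

theorem set_map_range (f : Nat → Int) (m i : Nat) (v : Int) (hi : i < m) :
    ((List.range m).map f).set i v = (List.range m).map (fun k => if k = i then v else f k) := by
  apply List.ext_getElem
  · simp
  · intro j h1 h2
    simp only [List.getElem_set, List.getElem_map, List.getElem_range]
    by_cases hji : j = i
    · simp [hji]
    · simp [hji, Ne.symm hji]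

theorem loopA (n R : Int) (D : List Int) (hn : 0 ≤ n) (hR : 0 ≤ R)
    (hDa : ∀ i < D.length, D.getD i 0 = pvDig n i)
    (hDb : ∀ i < D.length, D.getD (D.length - 1 - i) 0 = pvDig R i) :
    ∀ i, i ≤ D.length →
    (List.range i).foldl
      (fun (st : List Int × List Int) k =>
        (st.1.set k (PySem.Int.mod (D.getD k 0 + D.getD (D.length - 1 - k) 0 + st.2.getD k 0) 10),
         st.2.set (k + 1) (PySem.Int.floordiv (D.getD k 0 + D.getD (D.length - 1 - k) 0 + st.2.getD k 0) 10)))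
      (List.replicate (D.length + 1) 0, List.replicate (D.length + 1) 0)
    = ((List.range (D.length + 1)).map (fun k => if k < i then pvDig (n + R) k else 0),
       (List.range (D.length + 1)).map (fun k => if k ≤ i then pvCar n R k else 0)) := by
  intro i
  induction i with
  | zero =>
    intro _
    simp only [List.range_zero, List.foldl_nil, Prod.mk.injEq]
    refine ⟨?_, ?_⟩
    · have h1 : (fun k : Nat => if k < 0 then pvDig (n + R) k else 0) = fun _ : Nat => (0:Int) := by
        funext k; simp
      rw [h1, List.map_const', List.length_range]
    · have h2 : (fun k : Nat => if k ≤ 0 then pvCar n R k else 0) = fun _ : Nat => (0:Int) := by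
        funext k
        by_cases hk : k ≤ 0
        · rw [if_pos hk, Nat.le_zero.mp hk, pvCar_zero]
        · rw [if_neg hk]
      rw [h2, List.map_const', List.length_range]
  | succ i ih =>
    intro hi
    have hi' : i < D.length := hi
    rw [List.range_succ, List.foldl_append, ih (by omega), List.foldl_cons, List.foldl_nil]
    have hgc : ((List.range (D.length + 1)).map (fun k => if k ≤ i then pvCar n R k else 0)).getD i 0
        = pvCar n R i := by
      rw [PySem.List.getD_map_range _ _ _ _ (by omega : i < D.length + 1)]
      simp
    have hs : D.getD i 0 + D.getD (D.length - 1 - i) 0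
          + ((List.range (D.length + 1)).map (fun k => if k ≤ i then pvCar n R k else 0)).getD i 0
        = pvDig n i + pvDig R i + pvCar n R i := by
      rw [hgc, hDa i hi', hDb i hi']
    simp only [hs]
    have hmod : PySem.Int.mod (pvDig n i + pvDig R i + pvCar n R i) 10
        = pvDig (n + R) i := by
      rw [PySem.Int.mod_eq_emod_of_pos (by omega : (0:Int) < 10)]
      exact digit_eq n R hn hR i
    have hdiv : PySem.Int.floordiv (pvDig n i + pvDig R i + pvCar n R i) 10
        = pvCar n R (i + 1) := by
      rw [PySem.Int.floordiv_eq_ediv_of_pos (by omega : (0:Int) < 10)]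
      exact (carry_next n R hn hR i).symm
    rw [hmod, hdiv]
    simp only [Prod.mk.injEq]
    refine ⟨?_, ?_⟩
    · rw [set_map_range _ _ _ _ (by omega : i < D.length + 1)]
      apply List.map_congr_left
      intro k hk
      rcases eq_or_ne k i with rfl | hne
      · simp
      · simp only [if_neg hne]
        by_cases hki : k < i
        · rw [if_pos hki, if_pos (by omega)]
        · rw [if_neg hki, if_neg (by omega)]
    · rw [set_map_range _ _ _ _ (by omega : i + 1 < D.length + 1)]
      apply List.map_congr_left
      intro k hk
      rcases eq_or_ne k (i + 1) with rfl | hne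
      · simp
      · simp only [if_neg hne]
        by_cases hki : k ≤ i
        · rw [if_pos hki, if_pos (by omega)]
        · rw [if_neg hki, if_neg (by omega)]

theorem loopB (n R : Int) : ∀ m : Nat,
    (List.range m).foldl
      (fun (st : Int × List Int) _ =>
        (st.1 * 10, st.2 ++ [PySem.Int.floordiv (PySem.Int.mod n st.1 + PySem.Int.mod R st.1) st.1]))
      (1, [])
    = (10 ^ m, (List.range m).map
        (fun i => PySem.Int.floordiv (PySem.Int.mod n (10 ^ i) + PySem.Int.mod R (10 ^ i)) (10 ^ i))) := by
  intro m
  induction m with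
  | zero => simp
  | succ m ih =>
    rw [List.range_succ, List.foldl_append, ih, List.foldl_cons, List.foldl_nil,
      List.map_append]
    simp only [Prod.mk.injEq]
    refine ⟨by rw [pow_succ], by simp⟩

theorem pow_lt_pow_ten (a b : Nat) : (10:Int) ^ a < 10 ^ b ↔ a < b :=
  pow_lt_pow_iff_right₀ (by norm_num)

theorem len_det (T : Int) (L M : Nat) (hL : 1 ≤ L) (hM : 1 ≤ M)
    (h1 : 10 ^ (L - 1) ≤ T) (h2 : T < 10 ^ L) (h3 : 10 ^ (M - 1) ≤ T) (h4 : T < 10 ^ M) :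
    L = M := by
  have e1 : L - 1 < M := (pow_lt_pow_ten _ _).mp (lt_of_le_of_lt h1 h4)
  have e2 : M - 1 < L := (pow_lt_pow_ten _ _).mp (lt_of_le_of_lt h3 h2)
  omega

theorem pv_main (n : Int) (hnn : 0 ≤ n) : apply_T_simple n = apply_T_simple_alt n := by
  rcases eq_or_lt_of_le hnn with hzero | hpos
  · have hzero' : n = 0 := hzero.symm
    subst hzero'
    have h1 : number_to_digits_int 0 = [0] := by rw [number_to_digits_int, if_pos rfl]
    have h2 : pvRevLoop 0 0 = 0 := pvRevLoop_nonpos 0 (by omega)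
    simp only [apply_T_simple, apply_T_simple_alt, h2, show (0:Int) + 0 = 0 from rfl, h1]
    decide
  · have hn0 : ¬ n = 0 := by omega
    have hD : number_to_digits_int n = pvNdiLoop n := by
      rw [number_to_digits_int, if_neg hn0]
    obtain ⟨hrep, hlo, hhi, hlen⟩ := digits_spec n.toNat n le_rfl hpos
    have hmem := digits_mem n.toNat n le_rfl
    obtain ⟨hR0', hRlt', hRdig'⟩ := revVal_digit (pvNdiLoop n) hmem
    have hRv : pvRevLoop 0 n = (pvNdiLoop n).foldl (fun a dg => a * 10 + dg) 0 :=
      rev_eq n.toNat n 0 le_rfl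
    have hR0 : 0 ≤ pvRevLoop 0 n := by rw [hRv]; exact hR0'
    have hRlt : pvRevLoop 0 n < 10 ^ (pvNdiLoop n).length := by rw [hRv]; exact hRlt'
    have hDa : ∀ i < (pvNdiLoop n).length, (pvNdiLoop n).getD i 0 = pvDig n i := by
      intro i hi
      conv_lhs => rw [hrep]
      exact PySem.List.getD_map_range (pvDig n) _ i 0 hi
    have hDb : ∀ i < (pvNdiLoop n).length,
        (pvNdiLoop n).getD ((pvNdiLoop n).length - 1 - i) 0 = pvDig (pvRevLoop 0 n) i := by
      intro i hi
      simp only [pvDig, hRv]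
      exact (hRdig' i hi).symm
    have hT0 : 0 < n + pvRevLoop 0 n := by omega
    have hTne : ¬ n + pvRevLoop 0 n = 0 := by omega
    have hDT : number_to_digits_int (n + pvRevLoop 0 n) = pvNdiLoop (n + pvRevLoop 0 n) := by
      rw [number_to_digits_int, if_neg hTne]
    obtain ⟨hTrep, hTlo, hThi, hTlen⟩ :=
      digits_spec (n + pvRevLoop 0 n).toNat (n + pvRevLoop 0 n) le_rfl hT0
    have hA := loopA n (pvRevLoop 0 n) (pvNdiLoop n) hpos.le hR0 hDa hDb
      (pvNdiLoop n).length le_rfl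
    have hB := loopB n (pvRevLoop 0 n) ((pvNdiLoop n).length + 1)
    have hp10 : (0:Int) < 10 ^ (pvNdiLoop n).length := by positivity
    have hcd : pvCar n (pvRevLoop 0 n) (pvNdiLoop n).length
        = (n + pvRevLoop 0 n) / 10 ^ (pvNdiLoop n).length := by
      simp only [pvCar]
      rw [Int.emod_eq_of_lt hpos.le hhi, Int.emod_eq_of_lt hR0 hRlt]
    have hgd : ((List.range ((pvNdiLoop n).length + 1)).map
          (fun k => if k ≤ (pvNdiLoop n).length then pvCar n (pvRevLoop 0 n) k else 0)).getD
          (pvNdiLoop n).length 0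
        = pvCar n (pvRevLoop 0 n) (pvNdiLoop n).length := by
      rw [PySem.List.getD_map_range _ _ _ _ (by omega : (pvNdiLoop n).length < (pvNdiLoop n).length + 1)]
      rw [if_pos le_rfl]
    have hcarr : (List.range ((pvNdiLoop n).length + 1)).map
          (fun k => if k ≤ (pvNdiLoop n).length then pvCar n (pvRevLoop 0 n) k else 0)
        = (List.range ((pvNdiLoop n).length + 1)).map
          (fun i => PySem.Int.floordiv
            (PySem.Int.mod n (10 ^ i) + PySem.Int.mod (pvRevLoop 0 n) (10 ^ i)) (10 ^ i)) := by
      apply List.map_congr_left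
      intro k hk
      rw [List.mem_range] at hk
      rw [if_pos (by omega)]
      simp only [pvCar, PySem.Int.mod_eq_emod_of_pos (show (0:Int) < 10 ^ k by positivity),
        PySem.Int.floordiv_eq_ediv_of_pos (show (0:Int) < 10 ^ k by positivity)]
    simp only [apply_T_simple, apply_T_simple_alt, hD, hDT]
    rw [hA, hB, hgd]
    by_cases hc : 10 ^ (pvNdiLoop n).length ≤ n + pvRevLoop 0 n
    · -- final carry present: result has d+1 digits
      have hcd_pos : 0 < pvCar n (pvRevLoop 0 n) (pvNdiLoop n).length := by
        rw [hcd]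
        have h1 : 1 ≤ (n + pvRevLoop 0 n) / 10 ^ (pvNdiLoop n).length := by
          rw [Int.le_ediv_iff_mul_le hp10, one_mul]
          exact hc
        omega
      have hThi' : n + pvRevLoop 0 n < 10 ^ ((pvNdiLoop n).length + 1) := by
        rw [pow_succ]
        nlinarith
      have hLeq : (pvNdiLoop (n + pvRevLoop 0 n)).length = (pvNdiLoop n).length + 1 :=
        len_det (n + pvRevLoop 0 n) _ _ hTlen (by omega) hTlo hThi
          (by simpa using hc) hThi'
      rw [if_pos hcd_pos]
      have hres : (((List.range ((pvNdiLoop n).length + 1)).map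
            (fun k => if k < (pvNdiLoop n).length then pvDig (n + pvRevLoop 0 n) k else 0)).set
            (pvNdiLoop n).length (pvCar n (pvRevLoop 0 n) (pvNdiLoop n).length)).take
            ((pvNdiLoop n).length + 1)
          = pvNdiLoop (n + pvRevLoop 0 n) := by
        rw [set_map_range _ _ _ _ (by omega : (pvNdiLoop n).length < (pvNdiLoop n).length + 1)]
        rw [List.take_of_length_le (by simp)]
        rw [hTrep, hLeq]
        apply List.map_congr_left
        intro k hk
        rw [List.mem_range] at hk
        rcases eq_or_ne k (pvNdiLoop n).length with rfl | hne
        · rw [if_pos rfl, hcd]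
          simp only [pvDig]
          have hq0 : 0 ≤ (n + pvRevLoop 0 n) / 10 ^ (pvNdiLoop n).length :=
            Int.ediv_nonneg (by omega) (by positivity)
          have hqlt : (n + pvRevLoop 0 n) / 10 ^ (pvNdiLoop n).length < 10 := by
            rw [Int.ediv_lt_iff_lt_mul hp10]
            calc n + pvRevLoop 0 n < 10 ^ ((pvNdiLoop n).length + 1) := hThi'
              _ = 10 * 10 ^ (pvNdiLoop n).length := by rw [pow_succ]; ring
          rw [Int.emod_eq_of_lt hq0 hqlt]
        · rw [if_neg hne, if_pos (by omega)]
      rw [hres, roundtrip_loop (n + pvRevLoop 0 n).toNat (n + pvRevLoop 0 n) le_rfl (by omega)]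
      simp only [Prod.mk.injEq]
      exact ⟨trivial, trivial, hcarr⟩
    · -- no final carry: result has d digits
      have hcd0 : pvCar n (pvRevLoop 0 n) (pvNdiLoop n).length = 0 := by
        rw [hcd]
        exact Int.ediv_eq_zero_of_lt (by omega) (by omega)
      rw [if_neg (by rw [hcd0]; omega)]
      have hLeq : (pvNdiLoop (n + pvRevLoop 0 n)).length = (pvNdiLoop n).length :=
        len_det (n + pvRevLoop 0 n) _ _ hTlen (by omega) hTlo hThi
          (by
            calc (10:Int) ^ ((pvNdiLoop n).length - 1) ≤ n := hlo
              _ ≤ n + pvRevLoop 0 n := by omega)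
          (by omega)
      have hres : ((List.range ((pvNdiLoop n).length + 1)).map
            (fun k => if k < (pvNdiLoop n).length then pvDig (n + pvRevLoop 0 n) k else 0)).take
            (pvNdiLoop n).length
          = pvNdiLoop (n + pvRevLoop 0 n) := by
        rw [← List.map_take, List.take_range, min_eq_left (by omega)]
        rw [hTrep, hLeq]
        apply List.map_congr_left
        intro k hk
        rw [List.mem_range] at hk
        rw [if_pos hk]
      rw [hres, roundtrip_loop (n + pvRevLoop 0 n).toNat (n + pvRevLoop 0 n) le_rfl (by omega)]
      simp only [Prod.mk.injEq]
      exact ⟨trivial, trivial, hcarr⟩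

-- ===== VERDICT (by name: the statement is the Claim_ definition above) =====
theorem apply_T_simple_spec : Claim_equal_apply_T_simple := by
  intro n _ hpre
  exact pv_main n hpre
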